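-- pv_equiv track=rewrite | github.com/eselyavka/python | leetcode/solution_1222.py | gen_vertical
-- ===== SOURCE A (Python) =====
-- def gen_vertical(row, col, s, king):
--     up = False
--     down = False
--
--     for i in range(row - 1, -1, -1):
--         if (i, col) in s:
--             break
--         if [i, col] == king:
--             up = True
--             break
--
--     for i in range(row + 1, 8):
--         if (i, col) in s:
--             break
--         if [i, col] == king:
--             down = True
--             break
--
--     return any([up, down])
-- ===== SOURCE B (Python) =====
-- def gen_vertical(row, col, s, king):
--     if len(king) != 2:
--         return False
--     kr, kc = king
--     if kc != col or kr == row: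
--         return False
--     if kr < row:
--         return kr >= 0 and all((i, col) not in s for i in range(kr, row))
--     return kr <= 7 and all((i, col) not in s for i in range(row + 1, kr + 1))
-- ===== Notes on version B (the rewrite author's own statement) =====
-- stated objective: faster
-- what changed: Replaces A's two interleaved king-or-blocker scans (up to 0 and down to 7) with an alignment guard on the king's column plus a single blocker-free interval check between the king and the queen's row, so misaligned kings cost O(1) and aligned ones only the interval.
import Mathlib
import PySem

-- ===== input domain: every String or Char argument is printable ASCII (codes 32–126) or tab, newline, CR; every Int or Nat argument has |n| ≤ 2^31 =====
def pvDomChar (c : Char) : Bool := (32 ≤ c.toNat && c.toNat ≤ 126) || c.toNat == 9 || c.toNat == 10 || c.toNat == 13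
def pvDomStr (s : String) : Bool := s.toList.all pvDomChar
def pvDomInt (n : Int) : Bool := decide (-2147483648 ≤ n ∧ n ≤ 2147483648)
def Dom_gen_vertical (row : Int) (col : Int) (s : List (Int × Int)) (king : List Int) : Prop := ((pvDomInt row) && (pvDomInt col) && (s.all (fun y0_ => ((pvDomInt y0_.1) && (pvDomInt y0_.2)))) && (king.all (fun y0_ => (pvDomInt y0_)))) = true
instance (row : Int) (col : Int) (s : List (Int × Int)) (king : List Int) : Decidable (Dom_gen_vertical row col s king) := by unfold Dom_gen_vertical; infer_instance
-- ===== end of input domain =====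

-- B: alignment guard on the king's column + one blocker-free interval check, instead of A's
-- two interleaved king-or-blocker scans; same return value on every input (objective: simpler).

-- ===== PORT A =====
-- one of A's scan loops: walk the row indices in order; a blocker breaks with the flag
-- still False, reaching the king's square breaks with the flag True
def scanA (col : Int) (s : List (Int × Int)) (king : List Int) : List Int → Bool
  | [] => false
  | i :: rest =>
      if (i, col) ∈ s then false
      else if king = [i, col] then true
      else scanA col s king rest

def gen_vertical (row : Int) (col : Int) (s : List (Int × Int)) (king : List Int) : Bool :=
  let up := scanA col s king (PySem.List.pyRange (row - 1) (-1) (-1))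
  let down := scanA col s king (PySem.List.pyRange (row + 1) 8 1)
  [up, down].any id

-- ===== PORT B =====
def gen_vertical_alt (row : Int) (col : Int) (s : List (Int × Int)) (king : List Int) : Bool :=
  match king with
  | [kr, kc] =>
      if kc ≠ col ∨ kr = row then false
      else if kr < row then
        decide (0 ≤ kr) && (PySem.List.pyRange kr row 1).all (fun i => decide ((i, col) ∉ s))
      else
        decide (kr ≤ 7) && (PySem.List.pyRange (row + 1) (kr + 1) 1).all (fun i => decide ((i, col) ∉ s))
  | _ => false

-- ===== PRECONDITION & SPEC =====
def Spec_gen_vertical (row : Int) (col : Int) (s : List (Int × Int)) (king : List Int) (out : Bool) : Prop := out = gen_vertical_alt row col s king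
instance (row : Int) (col : Int) (s : List (Int × Int)) (king : List Int) (out : Bool) : Decidable (Spec_gen_vertical row col s king out) := by unfold Spec_gen_vertical; infer_instance

-- ===== CLAIM (what is proved, stated in full; the proofs are below) =====
def Claim_equal_gen_vertical : Prop := ∀ (row : Int) (col : Int) (s : List (Int × Int)) (king : List Int), Dom_gen_vertical row col s king → Spec_gen_vertical row col s king (gen_vertical row col s king)

-- ===== LEMMAS AND PROOFS =====

-- ===== VERDICT (by name: the statement is the Claim_ definition above) =====
-- if the king is never on column col, A's scans return False
lemma scanA_false (col : Int) (s : List (Int × Int)) (king : List Int)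
    (h : ∀ i : Int, king ≠ [i, col]) : ∀ L : List Int, scanA col s king L = false := by
  intro L
  induction L with
  | nil => rfl
  | cons i rest ih =>
      simp only [scanA]
      split_ifs with h1 h2
      · rfl
      · exact absurd h2 (h i)
      · exact ih

-- characterisation of A's upward scan (range(a, -1, -1)) when the king is [kr, col]
lemma scanA_up (col kr : Int) (s : List (Int × Int)) (a : Int) :
    scanA col s [kr, col] (PySem.List.pyRange a (-1) (-1)) =
      (decide (0 ≤ kr) && decide (kr ≤ a) &&
        (PySem.List.pyRange kr (a + 1) 1).all (fun i => decide ((i, col) ∉ s))) := by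
  induction hn : (a + 1).toNat generalizing a with
  | zero =>
      rw [PySem.List.pyRange_neg_one_eq_nil (by omega)]
      have h1 : (decide (0 ≤ kr) && decide (kr ≤ a)) = false := by
        rcases lt_or_ge kr 0 with h | h
        · simp; omega
        · have : ¬ kr ≤ a := by omega
          simp [this]
      rw [h1, Bool.false_and]
      rfl
  | succ n ih =>
      have ha : 0 ≤ a := by omega
      rw [PySem.List.pyRange_neg_one_cons (by omega)]
      simp only [scanA]
      split_ifs with hb hk
      · -- blocker at (a, col)
        by_cases hle : 0 ≤ kr ∧ kr ≤ a
        · have hall : ((PySem.List.pyRange kr (a + 1) 1).all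
              (fun i => decide ((i, col) ∉ s))) = false := by
            rw [List.all_eq_false]
            refine ⟨a, ?_, by simp [hb]⟩
            rw [PySem.List.mem_pyRange_one]
            omega
          rw [hall, Bool.and_false]
        · have h1 : (decide (0 ≤ kr) && decide (kr ≤ a)) = false := by
            rcases lt_or_ge kr 0 with h | h
            · simp; omega
            · have : ¬ kr ≤ a := by omega
              simp [this]
          rw [h1, Bool.false_and]
      · -- king found at (a, col)
        have hkr : kr = a := by
          injection hk with h1 _
        subst hkr
        rw [PySem.List.pyRange_one_singleton]
        simp [ha, hb]
      · -- neither: step down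
        have hne : kr ≠ a := by
          intro h; apply hk; rw [h]
        rw [ih (a - 1) (by omega)]
        have h2 : a - 1 + 1 = a := by omega
        rw [h2]
        by_cases h3 : kr ≤ a - 1
        · have h4 : kr ≤ a := by omega
          rw [PySem.List.pyRange_one_succ_right h4]
          simp [h3, h4, List.all_append, hb]
        · have h4 : ¬ kr ≤ a := by omega
          simp [h3, h4]

-- characterisation of A's downward scan (range(a, 8)) when the king is [kr, col]
lemma scanA_down (col kr : Int) (s : List (Int × Int)) (a : Int) :
    scanA col s [kr, col] (PySem.List.pyRange a 8 1) =
      (decide (a ≤ kr) && decide (kr ≤ 7) &&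
        (PySem.List.pyRange a (kr + 1) 1).all (fun i => decide ((i, col) ∉ s))) := by
  induction hn : (8 - a).toNat generalizing a with
  | zero =>
      rw [PySem.List.pyRange_one_eq_nil (by omega)]
      have h1 : (decide (a ≤ kr) && decide (kr ≤ 7)) = false := by
        rcases le_or_gt a kr with h | h
        · have : ¬ kr ≤ 7 := by omega
          simp [this]
        · simp; omega
      rw [h1, Bool.false_and]
      rfl
  | succ n ih =>
      have ha : a < 8 := by omega
      rw [PySem.List.pyRange_one_cons (by omega)]
      simp only [scanA]
      split_ifs with hb hk
      · -- blocker at (a, col)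
        by_cases hle : a ≤ kr ∧ kr ≤ 7
        · have hall : ((PySem.List.pyRange a (kr + 1) 1).all
              (fun i => decide ((i, col) ∉ s))) = false := by
            rw [List.all_eq_false]
            refine ⟨a, ?_, by simp [hb]⟩
            rw [PySem.List.mem_pyRange_one]
            omega
          rw [hall, Bool.and_false]
        · have h1 : (decide (a ≤ kr) && decide (kr ≤ 7)) = false := by
            rcases le_or_gt a kr with h | h
            · have : ¬ kr ≤ 7 := by omega
              simp [this]
            · simp; omega
          rw [h1, Bool.false_and]
      · -- king found at (a, col)
        have hkr : kr = a := by
          injection hk with h1 _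
        subst hkr
        rw [PySem.List.pyRange_one_singleton]
        simp [hb]
        omega
      · -- neither: step up
        have hne : kr ≠ a := by
          intro h; apply hk; rw [h]
        rw [ih (a + 1) (by omega)]
        by_cases h3 : a + 1 ≤ kr
        · have h4 : a ≤ kr := by omega
          rw [PySem.List.pyRange_one_cons (show a < kr + 1 by omega)]
          simp [h3, h4, hb]
        · have h4 : ¬ a ≤ kr := by omega
          simp [h3, h4]

-- ===== VERDICT (by name: the statement is the Claim_ definition above) =====
theorem gen_vertical_spec : Claim_equal_gen_vertical := by
  intro row col s king _
  unfold Spec_gen_vertical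
  match king with
  | [] =>
      simp [gen_vertical, gen_vertical_alt, scanA_false col s [] (by intro i h; cases h)]
  | [x] =>
      simp [gen_vertical, gen_vertical_alt, scanA_false col s [x] (by intro i h; cases h)]
  | x :: y :: z :: rest =>
      simp [gen_vertical, gen_vertical_alt,
        scanA_false col s (x :: y :: z :: rest) (by intro i h; cases h)]
  | [kr, kc] =>
      by_cases hc : kc = col
      · subst hc
        simp only [gen_vertical, gen_vertical_alt, scanA_up, scanA_down,
          List.any_cons, List.any_nil, id, Bool.or_false]
        by_cases hkr : kr = row
        · subst hkr
          have h1 : ¬ kr ≤ kr - 1 := by omega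
          have h2 : ¬ kr + 1 ≤ kr := by omega
          simp [h1, h2]
        · by_cases hlt : kr < row
          · have h1 : kr ≤ row - 1 := by omega
            have h2 : ¬ row + 1 ≤ kr := by omega
            have h3 : row - 1 + 1 = row := by omega
            simp [h1, h2, h3, hkr, hlt]
          · have hgt : row < kr := by omega
            have h1 : ¬ kr ≤ row - 1 := by omega
            have h2 : row + 1 ≤ kr := by omega
            simp [h1, h2, hkr, hlt]
      · have hf := scanA_false col s [kr, kc]
          (by intro i h; injection h with _ h2; injection h2 with h3 _; exact hc h3)
        simp [gen_vertical, gen_vertical_alt, hf, hc]
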